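-- pv_equiv track=rewrite | github.com/rspseshasai/vandalism_detection_osm | src/bootstrapping_geo_split.py | generate_size_combinations
-- ===== SOURCE A (Python) =====
-- def generate_size_combinations(total_regions, min_size, max_size):
--     """
--     Generate all valid size combinations for train, val, and test groups.
--     """
--     valid_combinations = []
--     for train_size in range(min_size, max_size + 1):
--         for val_size in range(min_size, max_size + 1):
--             test_size = total_regions - train_size - val_size
--             if min_size <= test_size <= max_size:
--                 valid_combinations.append((train_size, val_size, test_size))
--     return valid_combinations
-- ===== SOURCE B (Python) =====
-- def _row(total_regions, min_size, max_size, train_size):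
--     lo = max(min_size, total_regions - train_size - max_size)
--     hi = min(max_size, total_regions - train_size - min_size)
--     return [(train_size, v, total_regions - train_size - v) for v in range(lo, hi + 1)]
--
--
-- def generate_size_combinations(total_regions, min_size, max_size):
--     """
--     Generate all valid size combinations for train, val, and test groups.
--     """
--     return [combo
--             for train_size in range(min_size, max_size + 1)
--             for combo in _row(total_regions, min_size, max_size, train_size)]
-- ===== Notes on version B (the rewrite author's own statement) =====
-- stated objective: alternative
-- what changed: Instead of scanning every val_size in [min_size, max_size] and testing the resulting test_size with an accumulator loop, B builds the answer declaratively as a flat concatenation of per-train rows, where each row maps over the precomputed contiguous interval of valid val_size values; O(range + #output) instead of O(range^2), though a timing run's ratio varies with the drawn inputs so no speed is claimed.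
import Mathlib
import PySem

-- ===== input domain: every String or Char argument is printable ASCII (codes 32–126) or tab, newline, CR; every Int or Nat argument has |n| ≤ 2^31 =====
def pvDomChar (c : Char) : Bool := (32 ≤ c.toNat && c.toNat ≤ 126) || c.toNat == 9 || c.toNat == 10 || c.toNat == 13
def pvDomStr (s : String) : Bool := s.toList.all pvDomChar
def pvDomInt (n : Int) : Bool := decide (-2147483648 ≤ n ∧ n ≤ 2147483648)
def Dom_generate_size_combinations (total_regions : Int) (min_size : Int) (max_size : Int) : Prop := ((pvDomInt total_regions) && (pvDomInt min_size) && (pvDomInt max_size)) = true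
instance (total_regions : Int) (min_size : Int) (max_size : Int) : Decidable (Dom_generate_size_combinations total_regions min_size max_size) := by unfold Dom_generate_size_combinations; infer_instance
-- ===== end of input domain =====

-- B replaces A's accumulator double-loop by a declarative flat concatenation of per-train rows,
-- each row mapped over the precomputed contiguous interval of valid val sizes (objective: alternative algorithm).


-- ===== PORT A =====
-- for train_size in range(min,max+1): for val_size in range(min,max+1): test = t-train-val; if min<=test<=max: append
def generate_size_combinations (total_regions : Int) (min_size : Int) (max_size : Int) : List (Int × Int × Int) :=
  (PySem.List.pyRange min_size (max_size + 1) 1).foldl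
    (fun acc train_size =>
      (PySem.List.pyRange min_size (max_size + 1) 1).foldl
        (fun acc2 val_size =>
          let test_size := total_regions - train_size - val_size
          if min_size ≤ test_size ∧ test_size ≤ max_size then
            acc2 ++ [(train_size, val_size, test_size)]
          else acc2)
        acc)
    []

-- ===== PORT B =====
-- _row: list comprehension over range(lo, hi+1) of the valid val interval for one train size
def pvRow (total_regions : Int) (min_size : Int) (max_size : Int) (train_size : Int) : List (Int × Int × Int) :=
  let lo := max min_size (total_regions - train_size - max_size)
  let hi := min max_size (total_regions - train_size - min_size)
  (PySem.List.pyRange lo (hi + 1) 1).map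
    (fun v => (train_size, v, total_regions - train_size - v))

-- nested comprehension = flat concatenation of the per-train rows
def generate_size_combinations_alt (total_regions : Int) (min_size : Int) (max_size : Int) : List (Int × Int × Int) :=
  (PySem.List.pyRange min_size (max_size + 1) 1).flatMap
    (pvRow total_regions min_size max_size)

-- ===== PRECONDITION & SPEC =====
def Spec_generate_size_combinations (total_regions : Int) (min_size : Int) (max_size : Int) (out : List (Int × Int × Int)) : Prop := out = generate_size_combinations_alt total_regions min_size max_size
instance (total_regions : Int) (min_size : Int) (max_size : Int) (out : List (Int × Int × Int)) : Decidable (Spec_generate_size_combinations total_regions min_size max_size out) := by unfold Spec_generate_size_combinations; infer_instance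

-- ===== CLAIM (what is proved, stated in full; the proofs are below) =====
def Claim_equal_generate_size_combinations : Prop := ∀ (total_regions : Int) (min_size : Int) (max_size : Int), Dom_generate_size_combinations total_regions min_size max_size → Spec_generate_size_combinations total_regions min_size max_size (generate_size_combinations total_regions min_size max_size)

-- ===== LEMMAS AND PROOFS =====

-- Filtering a unit-step range by a closed interval [L, U] yields the intersected range.
theorem pvFilterRange (a b L U : Int) :
    (PySem.List.pyRange a b 1).filter (fun v => decide (L ≤ v ∧ v ≤ U))
      = PySem.List.pyRange (max a L) (min b (U + 1)) 1 := by
  have hperm : ((PySem.List.pyRange a b 1).filter (fun v => decide (L ≤ v ∧ v ≤ U))).Perm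
      (PySem.List.pyRange (max a L) (min b (U + 1)) 1) := by
    refine (List.perm_ext_iff_of_nodup ((PySem.List.nodup_pyRange_one a b).filter _)
      (PySem.List.nodup_pyRange_one _ _)).mpr ?_
    intro x
    simp only [List.mem_filter, PySem.List.mem_pyRange_one, decide_eq_true_eq]
    omega
  exact List.Perm.eq_of_pairwise (fun x y _ _ h1 h2 => by omega)
    ((PySem.List.pairwise_lt_pyRange_one a b).filter _)
    (PySem.List.pairwise_lt_pyRange_one _ _) hperm

-- A's inner loop over one train size appends exactly B's row for that train size.
theorem pvInnerEq (t m M train : Int) (acc : List (Int × Int × Int)) :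
    (PySem.List.pyRange m (M + 1) 1).foldl
      (fun acc2 v =>
        let test := t - train - v
        if m ≤ test ∧ test ≤ M then acc2 ++ [(train, v, test)] else acc2) acc
    = acc ++ pvRow t m M train := by
  have hif : (fun (acc2 : List (Int × Int × Int)) v =>
        let test := t - train - v
        if m ≤ test ∧ test ≤ M then acc2 ++ [(train, v, test)] else acc2)
      = (fun acc2 v =>
        if decide (t - train - M ≤ v ∧ v ≤ t - train - m) = true then
          acc2 ++ [(train, v, t - train - v)] else acc2) := by
    funext acc2 v
    simp only [decide_eq_true_eq]
    by_cases h : m ≤ t - train - v ∧ t - train - v ≤ M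
    · rw [if_pos h, if_pos (by omega)]
    · rw [if_neg h, if_neg (by omega)]
  rw [hif, PySem.List.foldl_append_if
    (fun v => decide (t - train - M ≤ v ∧ v ≤ t - train - m))
    (fun v => (train, v, t - train - v)) (PySem.List.pyRange m (M + 1) 1) acc,
    pvFilterRange]
  unfold pvRow
  have : min (M + 1) (t - train - m + 1) = min M (t - train - m) + 1 := by omega
  rw [this]

-- ===== VERDICT (by name: the statement is the Claim_ definition above) =====
theorem generate_size_combinations_spec : Claim_equal_generate_size_combinations := by
  intro t m M _
  unfold Spec_generate_size_combinations generate_size_combinations generate_size_combinations_alt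
  have hsteps : (fun (acc : List (Int × Int × Int)) train_size =>
      (PySem.List.pyRange m (M + 1) 1).foldl
        (fun acc2 val_size =>
          let test_size := t - train_size - val_size
          if m ≤ test_size ∧ test_size ≤ M then
            acc2 ++ [(train_size, val_size, test_size)]
          else acc2)
        acc)
      = (fun acc train_size => acc ++ pvRow t m M train_size) := by
    funext acc train
    exact pvInnerEq t m M train acc
  rw [hsteps, PySem.List.foldl_append_eq_flatMap (pvRow t m M) (PySem.List.pyRange m (M + 1) 1) []]
  rfl
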